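-- pv_equiv track=rewrite | github.com/spegeerino/projects | Project Euler/projeuler333.py | first_partition
-- ===== SOURCE A (Python) =====
-- def first_partition(n):
--     r = 0 #power of 2
--     out = []
--     while n > 0:
--         while n & 1 == 0:
--             n = n >> 1
--             r += 1
--         largest = 1
--         while n >= largest:
--             largest *= 3
--         largest //= 3
--         n -= largest
--         twor = 1 << r
--         out.append(twor * largest)
--     return out
-- ===== SOURCE B (Python) =====
-- def _bisect_right(ps, x):
--     lo, hi = 0, len(ps)
--     while lo < hi:
--         mid = (lo + hi) // 2
--         if ps[mid] <= x:
--             lo = mid + 1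
--         else:
--             hi = mid
--     return lo
--
--
-- def first_partition(n):
--     # table of all powers of 3 <= n, built once (ascending)
--     powers = []
--     p = 1
--     while p <= n:
--         powers.append(p)
--         p *= 3
--     out = []
--     r = 0
--     while n > 0:
--         while n % 2 == 0:
--             n //= 2
--             r += 1
--         p = powers[_bisect_right(powers, n) - 1]
--         n -= p
--         out.append((1 << r) * p)
--     return out
-- ===== Notes on version B (the rewrite author's own statement) =====
-- stated objective: alternative
-- what changed: B precomputes a sorted table of all powers of 3 up to n once and selects the largest power <= n by hand-written binary search, instead of A's per-iteration multiply-up scan from 1.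
import Mathlib
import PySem

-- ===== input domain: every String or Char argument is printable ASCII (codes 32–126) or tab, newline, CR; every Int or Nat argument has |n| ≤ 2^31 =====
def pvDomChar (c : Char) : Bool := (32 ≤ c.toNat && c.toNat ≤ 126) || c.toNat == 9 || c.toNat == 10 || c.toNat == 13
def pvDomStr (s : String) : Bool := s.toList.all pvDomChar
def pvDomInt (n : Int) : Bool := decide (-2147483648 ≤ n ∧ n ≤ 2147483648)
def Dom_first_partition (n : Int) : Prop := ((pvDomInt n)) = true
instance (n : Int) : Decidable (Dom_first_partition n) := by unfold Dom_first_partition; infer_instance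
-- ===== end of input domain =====

-- B replaces A's per-iteration multiply-up search for the largest power of 3 by a
-- power-of-3 table built once plus a hand-written binary search (objective: alternative).

-- ===== PORT A =====
-- inner `while n & 1 == 0: n >>= 1; r += 1`; the `0 < n` conjunct is a totality
-- guard only (the outer loop calls it with n > 0, where Python's loop terminates)
def stripA (n r : Int) : Int × Int :=
  if h : 0 < n ∧ Int.land n 1 = 0 then stripA (n >>> (1:Nat)) (r + 1) else (n, r)
termination_by n.toNat
decreasing_by
  have h0 : n >>> (1:Nat) = PySem.Int.floordiv n 2 := by
    obtain ⟨m, rfl⟩ := Int.eq_ofNat_of_zero_le (le_of_lt h.1)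
    show Int.ofNat (m >>> 1) = _
    rw [Nat.shiftRight_eq_div_pow]
    exact_mod_cast (PySem.Int.floordiv_natCast m 2).symm
  rw [h0, PySem.Int.floordiv_eq_ediv_of_pos (by omega)]
  omega

-- inner `while n >= largest: largest *= 3`; `0 < largest` is a totality guard only
def growA (n largest : Int) : Int :=
  if h : 0 < largest ∧ largest ≤ n then growA n (largest * 3) else largest
termination_by (n + 1 - largest).toNat
decreasing_by omega

-- outer `while n > 0`; fuel is a totality guard: n decreases by ≥ 1 per round,
-- so fuel n.toNat never runs out before the loop guard fails
def loopA : Nat → Int → Int → List Int → List Int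
  | 0, _, _, out => out
  | fuel + 1, n, r, out =>
    if 0 < n then
      let s := stripA n r
      let largest := PySem.Int.floordiv (growA s.1 1) 3
      loopA fuel (s.1 - largest) s.2 (out ++ [((1:Int) <<< s.2.toNat) * largest])
    else out

def first_partition (n : Int) : List Int := loopA n.toNat n 0 []

-- ===== PORT B =====
-- `while p <= n: powers.append(p); p *= 3`; `0 < p` is a totality guard only
def buildB (n p : Int) : List Int :=
  if h : p ≤ n ∧ 0 < p then p :: buildB n (p * 3) else []
termination_by (n + 1 - p).toNat
decreasing_by omega

-- hand-written `_bisect_right` loop; `.getD 0` only totalizes the in-range ps[mid]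
def bisectGo (ps : List Int) (x lo hi : Int) : Int :=
  if h : lo < hi then
    let mid := PySem.Int.floordiv (lo + hi) 2
    if (PySem.List.pyGet? ps mid).getD 0 ≤ x then bisectGo ps x (mid + 1) hi
    else bisectGo ps x lo mid
  else lo
termination_by (hi - lo).toNat
decreasing_by
  · have := PySem.Int.floordiv_two_mid_bounds (le_of_lt h)
    have hlt : PySem.Int.floordiv (lo + hi) 2 < hi := by
      rw [PySem.Int.floordiv_lt_iff_lt_mul (by omega)]; omega
    omega
  · have := PySem.Int.floordiv_two_mid_bounds (le_of_lt h)
    have hlt : PySem.Int.floordiv (lo + hi) 2 < hi := by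
      rw [PySem.Int.floordiv_lt_iff_lt_mul (by omega)]; omega
    omega

def stripB (n r : Int) : Int × Int :=
  if h : 0 < n ∧ PySem.Int.mod n 2 = 0 then stripB (PySem.Int.floordiv n 2) (r + 1) else (n, r)
termination_by n.toNat
decreasing_by
  rw [PySem.Int.floordiv_eq_ediv_of_pos (by omega)]
  omega

def loopB (powers : List Int) : Nat → Int → Int → List Int → List Int
  | 0, _, _, out => out
  | fuel + 1, n, r, out =>
    if 0 < n then
      let s := stripB n r
      let p := (PySem.List.pyGet? powers (bisectGo powers s.1 0 powers.length - 1)).getD 0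
      loopB powers fuel (s.1 - p) s.2 (out ++ [((1:Int) <<< s.2.toNat) * p])
    else out

def first_partition_alt (n : Int) : List Int := loopB (buildB n 1) n.toNat n 0 []

-- ===== PRECONDITION & SPEC =====
def Spec_first_partition (n : Int) (out : List Int) : Prop := out = first_partition_alt n
instance (n : Int) (out : List Int) : Decidable (Spec_first_partition n out) := by unfold Spec_first_partition; infer_instance

-- ===== CLAIM (what is proved, stated in full; the proofs are below) =====
def Claim_equal_first_partition : Prop := ∀ (n : Int), Dom_first_partition n → Spec_first_partition n (first_partition n)

-- ===== LEMMAS AND PROOFS =====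

theorem land_one_eq_mod (n : Int) (h : 0 < n) : Int.land n 1 = PySem.Int.mod n 2 := by
  obtain ⟨m, rfl⟩ := Int.eq_ofNat_of_zero_le (le_of_lt h)
  rw [PySem.Int.mod_eq_emod_of_pos (by norm_num)]
  show Int.ofNat (m &&& 1) = _
  rw [Nat.and_one_is_mod]
  rfl

theorem shiftr_one_eq (n : Int) (h : 0 ≤ n) : n >>> (1:Nat) = PySem.Int.floordiv n 2 := by
  obtain ⟨m, rfl⟩ := Int.eq_ofNat_of_zero_le h
  show Int.ofNat (m >>> 1) = _
  rw [Nat.shiftRight_eq_div_pow]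
  exact_mod_cast (PySem.Int.floordiv_natCast m 2).symm

theorem strip_eq (n r : Int) : stripA n r = stripB n r := by
  rw [stripA, stripB]
  by_cases hA : 0 < n ∧ Int.land n 1 = 0
  · have hm : PySem.Int.mod n 2 = 0 := by rw [← land_one_eq_mod n hA.1]; exact hA.2
    rw [dif_pos hA, dif_pos ⟨hA.1, hm⟩, shiftr_one_eq n (le_of_lt hA.1)]
    exact strip_eq _ _
  · rw [dif_neg hA, dif_neg (fun hB => hA ⟨hB.1, by rw [land_one_eq_mod n hB.1]; exact hB.2⟩)]
termination_by n.toNat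
decreasing_by
  have := hA.1
  rw [PySem.Int.floordiv_eq_ediv_of_pos (by omega)]
  omega

theorem strip_pos (n r : Int) (h : 0 < n) :
    0 < (stripA n r).1 ∧ (stripA n r).1 ≤ n := by
  rw [stripA]
  by_cases hA : 0 < n ∧ Int.land n 1 = 0
  · rw [dif_pos hA]
    have hm : n % 2 = 0 := by
      have := land_one_eq_mod n hA.1
      rw [PySem.Int.mod_eq_emod_of_pos (by norm_num)] at this
      rw [← this]; exact hA.2
    have e : n >>> (1:Nat) = n / 2 := by
      rw [shiftr_one_eq n (le_of_lt hA.1), PySem.Int.floordiv_eq_ediv_of_pos (by norm_num)]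
    have h2 : 0 < n >>> (1:Nat) := by rw [e]; omega
    obtain ⟨ih1, ih2⟩ := strip_pos (n >>> (1:Nat)) (r + 1) h2
    exact ⟨ih1, le_trans ih2 (by rw [e]; omega)⟩
  · rw [dif_neg hA]; exact ⟨h, le_rfl⟩
termination_by n.toNat
decreasing_by
  rw [shiftr_one_eq n (le_of_lt hA.1), PySem.Int.floordiv_eq_ediv_of_pos (by norm_num)]
  have := hA.1
  omega

theorem growA_char (n l : Int) (hl : 0 < l) (hln : l ≤ n) :
    ∃ j : Nat, growA n l = l * 3 ^ (j + 1) ∧ l * 3 ^ j ≤ n ∧ n < l * 3 ^ (j + 1) := by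
  rw [growA, dif_pos ⟨hl, hln⟩]
  by_cases h3 : l * 3 ≤ n
  · obtain ⟨j', e, hle, hlt⟩ := growA_char n (l * 3) (by omega) h3
    refine ⟨j' + 1, ?_, ?_, ?_⟩
    · rw [e]; ring
    · calc l * 3 ^ (j' + 1) = l * 3 * 3 ^ j' := by ring
        _ ≤ n := hle
    · calc n < l * 3 * 3 ^ (j' + 1) := hlt
        _ = l * 3 ^ (j' + 1 + 1) := by ring
  · refine ⟨0, ?_, by simpa using hln, by simpa using (by omega : n < l * 3)⟩
    rw [growA, dif_neg (by push Not; intro; omega)]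
    ring
termination_by (n + 1 - l).toNat
decreasing_by omega

theorem buildB_char (N p : Int) (hp : 0 < p) :
    ∃ t : Nat, buildB N p = (List.range t).map (fun i => p * 3 ^ i) ∧
      (∀ i < t, p * 3 ^ i ≤ N) ∧ N < p * 3 ^ t := by
  rw [buildB]
  by_cases hpn : p ≤ N
  · rw [dif_pos ⟨hpn, hp⟩]
    obtain ⟨t', e, hb, ha⟩ := buildB_char N (p * 3) (by omega)
    refine ⟨t' + 1, ?_, ?_, ?_⟩
    · rw [e, List.range_succ_eq_map, List.map_cons, List.map_map]
      have hf : ((fun i => p * 3 ^ i) ∘ Nat.succ) = fun i => p * 3 * 3 ^ i := by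
        funext i; simp [Function.comp, pow_succ]; ring
      rw [hf]; simp
    · intro i hi
      cases i with
      | zero => simpa using hpn
      | succ i' =>
        have := hb i' (by omega)
        calc p * 3 ^ (i' + 1) = p * 3 * 3 ^ i' := by ring
          _ ≤ N := this
    · calc N < p * 3 * 3 ^ t' := ha
        _ = p * 3 ^ (t' + 1) := by ring
  · rw [dif_neg (by push Not; intro h; omega)]
    exact ⟨0, by simp, by omega, by simpa using not_le.mp hpn⟩
termination_by (N + 1 - p).toNat
decreasing_by omega

theorem bisect_inv (ps : List Int) (x : Int) (c : Int) (hc0 : 0 ≤ c) (hclen : c ≤ (ps.length : Int))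
    (hbelow : ∀ i : Nat, (i : Int) < c → ∀ v, ps[i]? = some v → v ≤ x)
    (habove : ∀ i : Nat, c ≤ (i : Int) → ∀ v, ps[i]? = some v → x < v)
    (lo hi : Int) (hlo : 0 ≤ lo) (hloc : lo ≤ c) (hch : c ≤ hi) (hhi : hi ≤ (ps.length : Int)) :
    bisectGo ps x lo hi = c := by
  rw [bisectGo]
  by_cases hlh : lo < hi
  · rw [dif_pos hlh]
    dsimp only
    have hb := PySem.Int.floordiv_two_mid_bounds (le_of_lt hlh)
    have hmlt : PySem.Int.floordiv (lo + hi) 2 < hi := by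
      rw [PySem.Int.floordiv_lt_iff_lt_mul (by omega)]; omega
    set mid := PySem.Int.floordiv (lo + hi) 2 with hmid
    have hmr : mid.toNat < ps.length := by omega
    have hcast : (mid.toNat : Int) = mid := Int.toNat_of_nonneg (by omega)
    have e1 : PySem.List.pyGet? ps mid = some (ps[mid.toNat]'hmr) := by
      rw [PySem.List.pyGet?_of_nonneg ps (show (0:Int) ≤ mid by omega)]
      exact List.getElem?_eq_getElem hmr
    rw [e1]
    simp only [Option.getD_some]
    by_cases hcmp : ps[mid.toNat]'hmr ≤ x
    · rw [if_pos hcmp]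
      have hmc : mid < c := by
        by_contra hge
        push Not at hge
        have := habove mid.toNat (by omega) _ (List.getElem?_eq_getElem hmr)
        omega
      exact bisect_inv ps x c hc0 hclen hbelow habove (mid + 1) hi (by omega) (by omega) hch hhi
    · rw [if_neg hcmp]
      have hmc : c ≤ mid := by
        by_contra hge
        push Not at hge
        have := hbelow mid.toNat (by omega) _ (List.getElem?_eq_getElem hmr)
        omega
      exact bisect_inv ps x c hc0 hclen hbelow habove lo mid hlo hloc hmc (by omega)
  · rw [dif_neg hlh]; omega
termination_by (hi - lo).toNat
decreasing_by
  · omega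
  · omega

theorem sel_eq (N x : Int) (hx : 1 ≤ x) (hxN : x ≤ N) :
    ∃ j : Nat,
      PySem.Int.floordiv (growA x 1) 3 = 3 ^ j ∧
      (PySem.List.pyGet? (buildB N 1) (bisectGo (buildB N 1) x 0 ((buildB N 1).length : Int) - 1)).getD 0 = 3 ^ j ∧
      (3:Int) ^ j ≤ x := by
  obtain ⟨j, eg, hle, hlt⟩ := growA_char x 1 one_pos hx
  simp only [one_mul] at eg hle hlt
  refine ⟨j, ?_, ?_, hle⟩
  · rw [eg, pow_succ, PySem.Int.floordiv_eq_ediv_of_pos (by norm_num)]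
    exact Int.mul_ediv_cancel _ (by norm_num)
  · obtain ⟨t, eb, hbnd, ha⟩ := buildB_char N 1 one_pos
    simp only [one_mul] at eb hbnd ha
    have hjt : j < t := by
      by_contra hge
      push Not at hge
      have h3 : (3:Int) ^ t ≤ 3 ^ j := pow_le_pow_right₀ (by norm_num) hge
      omega
    have hlen : (buildB N 1).length = t := by rw [eb]; simp
    have hget : ∀ i : Nat, i < t → (buildB N 1)[i]? = some (3 ^ i) := by
      intro i hi
      rw [eb]
      simp [hi]
    have hbis : bisectGo (buildB N 1) x 0 ((buildB N 1).length : Int) = ((j : Int) + 1) := by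
      apply bisect_inv (buildB N 1) x ((j : Int) + 1) (by omega) (by rw [hlen]; exact_mod_cast hjt)
      · intro i hi v hv
        have hit : i < t := by omega
        rw [hget i hit, Option.some_inj] at hv
        subst hv
        exact le_trans (pow_le_pow_right₀ (by norm_num) (by omega : i ≤ j)) hle
      · intro i hi v hv
        have hit : i < t := by
          rw [← hlen]
          exact (List.getElem?_eq_some_iff.mp hv).1
        rw [hget i hit, Option.some_inj] at hv
        subst hv
        exact lt_of_lt_of_le hlt (pow_le_pow_right₀ (by norm_num) (by omega))
      · omega
      · omega
      · omega
      · rfl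
    rw [hbis]
    have : ((j : Int) + 1) - 1 = ((j : Nat) : Int) := by omega
    rw [this, PySem.List.pyGet?_natCast, hget j hjt]
    rfl

theorem loop_eq (N : Int) (fuel : Nat) (n r : Int) (out : List Int) (hn : n ≤ N) :
    loopA fuel n r out = loopB (buildB N 1) fuel n r out := by
  induction fuel generalizing n r out with
  | zero => rfl
  | succ fuel ih =>
    simp only [loopA, loopB]
    by_cases hpos : 0 < n
    · rw [if_pos hpos, if_pos hpos, ← strip_eq n r]
      obtain ⟨hs1, hs2⟩ := strip_pos n r hpos
      obtain ⟨j, e1, e2, hjx⟩ := sel_eq N (stripA n r).1 (by omega) (by omega)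
      rw [e1, e2]
      apply ih
      have : (1:Int) ≤ 3 ^ j := one_le_pow₀ (by norm_num)
      omega
    · rw [if_neg hpos, if_neg hpos]

-- ===== VERDICT (by name: the statement is the Claim_ definition above) =====
theorem first_partition_spec : Claim_equal_first_partition := by
  intro n _
  unfold Spec_first_partition first_partition first_partition_alt
  exact loop_eq n n.toNat n 0 [] le_rfl
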